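-- pv_equiv track=rewrite | github.com/populationgenomics/talos | reanalysis/vep/transform_schema.py | transform_schema
-- ===== SOURCE A (Python) =====
-- def transform_schema(json_schema: str):
--     """
--     example input format:
--         'Struct{assembly_name:String,allele_string:String...'
--     example output format:
--         'struct{assembly_name:str,allele_string:str...'
--     :param json_schema:
--     :return:
--     """
--     for k, v in [
--         ('String', 'str'),
--         ('Array', 'array'),
--         ('Set', 'set'),
--         ('Tuple', 'tuple'),
--         ('Struct', 'struct'),
--         ('[', '<'),
--         (']', '>'),
--         ('Int32', 'int32'),
--         ('Int64', 'int64'),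
--         ('Float64', 'float64'),
--         ('Float32', 'float32'),
--     ]:
--         json_schema = json_schema.replace(k, v)
--     return json_schema
-- ===== SOURCE B (Python) =====
-- import re
--
-- _TYPE_MAP = {
--     'String': 'str',
--     'Array': 'array',
--     'Set': 'set',
--     'Tuple': 'tuple',
--     'Struct': 'struct',
--     '[': '<',
--     ']': '>',
--     'Int32': 'int32',
--     'Int64': 'int64',
--     'Float64': 'float64',
--     'Float32': 'float32',
-- }
-- _TOKEN_RE = re.compile('|'.join(map(re.escape, _TYPE_MAP)))
--
--
-- def transform_schema(json_schema: str):
--     """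
--     example input format:
--         'Struct{assembly_name:String,allele_string:String...'
--     example output format:
--         'struct{assembly_name:str,allele_string:str...'
--     :param json_schema:
--     :return:
--     """
--     return _TOKEN_RE.sub(lambda m: _TYPE_MAP[m.group()], json_schema)
-- ===== Notes on version B (the rewrite author's own statement) =====
-- stated objective: idiomatic
-- what changed: Replaces the eleven sequential str.replace passes by one compiled regex alternation doing a single left-to-right scan with a dict lookup per match, substituting all type tokens simultaneously.
-- intended difference: On inputs containing the substring 'StrucTuple', A's sequential passes cascade (the Tuple pass rewrites it and the later Struct pass also replaces the freshly created Struct token, lowercasing the region's leading S), while B substitutes all tokens simultaneously and keeps that S; B's single-pass result is the intended one since the type tokens should only be replaced where they occur in the input, not inside already-substituted output. — e.g. on transform_schema("StrucTuple"): A returns "structuple", B returns "Structuple"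
import Mathlib
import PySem

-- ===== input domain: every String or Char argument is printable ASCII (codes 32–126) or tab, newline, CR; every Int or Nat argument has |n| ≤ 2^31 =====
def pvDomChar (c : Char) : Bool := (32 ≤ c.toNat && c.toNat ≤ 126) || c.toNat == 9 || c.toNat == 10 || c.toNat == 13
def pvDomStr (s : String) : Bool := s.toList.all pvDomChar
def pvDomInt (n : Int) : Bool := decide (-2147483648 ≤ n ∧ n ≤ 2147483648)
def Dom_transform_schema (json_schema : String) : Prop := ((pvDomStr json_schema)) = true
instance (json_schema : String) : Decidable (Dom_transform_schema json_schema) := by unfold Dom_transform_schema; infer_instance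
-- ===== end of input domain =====

-- B replaces A's eleven sequential str.replace passes by one left-to-right scan substituting all
-- eleven type tokens simultaneously (the port of Python B's single compiled-regex-alternation sub);
-- return-value equivalence is proved outside D_ below, where A's sequential passes cascade.

-- ===== PORT A =====
def pvPairs : List (String × String) :=
  [("String", "str"),
   ("Array", "array"),
   ("Set", "set"),
   ("Tuple", "tuple"),
   ("Struct", "struct"),
   ("[", "<"),
   ("]", ">"),
   ("Int32", "int32"),
   ("Int64", "int64"),
   ("Float64", "float64"),
   ("Float32", "float32")]

def transform_schema (json_schema : String) : String :=
  pvPairs.foldl (fun s kv => PySem.Str.replace s kv.1 kv.2) json_schema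

-- ===== PORT B =====
-- B is `pattern.sub(lambda m: mapping[m.group()], json_schema)` with pattern the alternation of the
-- eleven escaped keys: re.sub scans left to right, at each position taking the first alternative
-- that matches (all alternatives are non-empty literals, so this scanner is exact for that regex).
def pvTable : List (List Char × List Char) :=
  [(['S','t','r','i','n','g'], ['s','t','r']),
   (['A','r','r','a','y'], ['a','r','r','a','y']),
   (['S','e','t'], ['s','e','t']),
   (['T','u','p','l','e'], ['t','u','p','l','e']),
   (['S','t','r','u','c','t'], ['s','t','r','u','c','t']),
   (['['], ['<']),
   ([']'], ['>']),
   (['I','n','t','3','2'], ['i','n','t','3','2']),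
   (['I','n','t','6','4'], ['i','n','t','6','4']),
   (['F','l','o','a','t','6','4'], ['f','l','o','a','t','6','4']),
   (['F','l','o','a','t','3','2'], ['f','l','o','a','t','3','2'])]

-- first alternative of the regex matching at this position, with its replacement
def pvFindTok (s : List Char) : Option (List Char × List Char) :=
  pvTable.find? (fun kv => kv.1.isPrefixOf s)

-- fuel-based scan (fuel = length, same device as PySem.Chars.replace.go): copy the character when
-- no alternative matches, else emit the replacement and continue after the matched key
def pvScanGo : Nat → List Char → List Char
  | _, [] => []
  | 0, l => l
  | fuel+1, c :: t =>
    match pvFindTok (c :: t) with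
    | some kv => kv.2 ++ pvScanGo fuel ((c :: t).drop kv.1.length)
    | none => c :: pvScanGo fuel t

def pvScan (s : List Char) : List Char := pvScanGo s.length s

def transform_schema_alt (json_schema : String) : String :=
  String.ofList (pvScan json_schema.toList)

-- ===== PRECONDITION & SPEC =====
-- On inputs containing the substring 'StrucTuple', A's sequential passes cascade (the Tuple pass
-- rewrites it and the later Struct pass also replaces the freshly created Struct token,
-- lowercasing the region's leading S), while B substitutes all tokens simultaneously and keeps
-- that S; B's single-pass result is the intended one since the type tokens should only be
-- replaced where they occur in the input, not inside already-substituted output.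
def D_transform_schema (json_schema : String) : Prop :=
  PySem.Str.isIn "StrucTuple" json_schema = true
instance (json_schema : String) : Decidable (D_transform_schema json_schema) := by
  unfold D_transform_schema; infer_instance

def Spec_transform_schema (json_schema : String) (out : String) : Prop :=
  ¬ D_transform_schema json_schema → out = transform_schema_alt json_schema
instance (json_schema : String) (out : String) : Decidable (Spec_transform_schema json_schema out) := by
  unfold Spec_transform_schema; infer_instance

def pvDiffWitness_transform_schema : String := "StrucTuple"
def pvDiffWitnessOut_transform_schema : String × String := ("structuple", "Structuple")

-- ===== CLAIM (what is proved, stated in full; the proofs are below) =====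
def Claim_unchanged_transform_schema : Prop := ∀ (json_schema : String), Dom_transform_schema json_schema → Spec_transform_schema json_schema (transform_schema json_schema)
def Claim_changed_transform_schema : Prop := Dom_transform_schema (pvDiffWitness_transform_schema) ∧ D_transform_schema (pvDiffWitness_transform_schema) ∧ transform_schema (pvDiffWitness_transform_schema) = pvDiffWitnessOut_transform_schema.1 ∧ transform_schema_alt (pvDiffWitness_transform_schema) = pvDiffWitnessOut_transform_schema.2 ∧ pvDiffWitnessOut_transform_schema.1 ≠ pvDiffWitnessOut_transform_schema.2

def Claim_exact_transform_schema : Prop := ∀ (json_schema : String), Dom_transform_schema json_schema → D_transform_schema json_schema → transform_schema json_schema ≠ transform_schema_alt json_schema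

-- ===== LEMMAS AND PROOFS =====

-- ---- a fuel-free view of PySem.Chars.replace (for a non-empty pattern) ----
def pvRep (old new : List Char) : List Char → List Char
  | [] => []
  | c :: t =>
    if old.isPrefixOf (c :: t) then new ++ pvRep old new (t.drop (old.length - 1))
    else c :: pvRep old new t
termination_by l => l.length
decreasing_by
  · simp only [List.length_drop, List.length_cons]; omega
  · simp

theorem go_nil (old new : List Char) (fuel : Nat) (acc : List Char) :
    PySem.Chars.replace.go old new fuel [] acc = acc.reverse := by
  cases fuel <;> rw [PySem.Chars.replace.go] <;> simp

theorem go_step_prefix (old new : List Char) (fuel : Nat) (c : Char) (t acc : List Char)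
    (h : old.isPrefixOf (c::t) = true) :
    PySem.Chars.replace.go old new (fuel+1) (c::t) acc =
      PySem.Chars.replace.go old new fuel ((c::t).drop old.length) (new.reverse ++ acc) := by
  rw [PySem.Chars.replace.go]; simp [h]

theorem go_step_cons (old new : List Char) (fuel : Nat) (c : Char) (t acc : List Char)
    (h : ¬ old.isPrefixOf (c::t) = true) :
    PySem.Chars.replace.go old new (fuel+1) (c::t) acc =
      PySem.Chars.replace.go old new fuel t (c::acc) := by
  rw [PySem.Chars.replace.go]; simp [h]

theorem go_eq_pvRep (old new : List Char) (hold : old ≠ []) :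
    ∀ fuel l acc, l.length ≤ fuel →
      PySem.Chars.replace.go old new fuel l acc = acc.reverse ++ pvRep old new l := by
  intro fuel
  induction fuel with
  | zero =>
    intro l acc h
    have hl : l = [] := by cases l with | nil => rfl | cons a b => simp at h
    subst hl; simp [go_nil, pvRep]
  | succ n ih =>
    intro l acc h
    cases l with
    | nil => simp [go_nil, pvRep]
    | cons c t =>
      by_cases hp : old.isPrefixOf (c::t) = true
      · have h1 : 1 ≤ old.length := by cases old with | nil => exact absurd rfl hold | cons a b => simp
        have hlen : ((c::t).drop old.length).length ≤ n := by
          simp only [List.length_drop]; simp at h ⊢; omega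
        rw [go_step_prefix _ _ _ _ _ _ hp, ih _ _ hlen]
        have hdrop : (c::t).drop old.length = t.drop (old.length - 1) := by
          obtain ⟨k, hk⟩ : ∃ k, old.length = k + 1 := ⟨old.length - 1, by omega⟩
          rw [hk]; simp
        rw [pvRep, if_pos hp, hdrop]; simp
      · have hlen : t.length ≤ n := by simp at h; omega
        rw [go_step_cons _ _ _ _ _ _ hp, ih _ _ hlen]
        rw [pvRep, if_neg hp]; simp

theorem rep_eq (s old new : List Char) (hold : old ≠ []) :
    PySem.Chars.replace s old new = pvRep old new s := by
  have he : old.isEmpty = false := by cases old with | nil => exact absurd rfl hold | cons a b => rfl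
  simp only [PySem.Chars.replace, he]
  simpa using go_eq_pvRep old new hold s.length s [] (le_refl _)

theorem R0 (old new : List Char) (hold : old ≠ []) : PySem.Chars.replace [] old new = [] := by
  rw [rep_eq _ _ _ hold, pvRep]

theorem R2 (old new : List Char) (c : Char) (t : List Char) (h : ¬ old.isPrefixOf (c::t) = true) :
    PySem.Chars.replace (c::t) old new = c :: PySem.Chars.replace t old new := by
  have hold : old ≠ [] := by intro he; subst he; simp [List.isPrefixOf] at h
  rw [rep_eq _ _ _ hold, rep_eq _ _ _ hold, pvRep, if_neg h]

theorem R1 (old new r : List Char) (hold : old ≠ []) :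
    PySem.Chars.replace (old ++ r) old new = new ++ PySem.Chars.replace r old new := by
  obtain ⟨o, old', rfl⟩ : ∃ o old', old = o :: old' := by
    cases old with | nil => exact absurd rfl hold | cons a b => exact ⟨a, b, rfl⟩
  rw [rep_eq _ _ _ hold, rep_eq _ _ _ hold]
  have hp : (o::old').isPrefixOf (o :: (old' ++ r)) = true := by
    simp [List.isPrefixOf_iff_prefix]
  rw [show (o::old') ++ r = o :: (old' ++ r) from rfl, pvRep, if_pos hp]
  simp

-- ---- scanner equations ----
theorem pvFindTok_key_pos {s : List Char} {kv : List Char × List Char}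
    (h : pvFindTok s = some kv) : 0 < kv.1.length := by
  have hm := List.mem_of_find?_eq_some h
  fin_cases hm <;> simp

theorem pvScanGo_congr : ∀ f1 f2 l, l.length ≤ f1 → l.length ≤ f2 → pvScanGo f1 l = pvScanGo f2 l := by
  intro f1
  induction f1 with
  | zero =>
    intro f2 l h1 h2
    have : l = [] := by cases l with | nil => rfl | cons a b => simp at h1
    subst this; cases f2 <;> rfl
  | succ n ih =>
    intro f2 l h1 h2
    cases l with
    | nil => cases f2 <;> rfl
    | cons c t =>
      obtain ⟨m, rfl⟩ : ∃ m, f2 = m + 1 := by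
        cases f2 with | zero => simp at h2 | succ m => exact ⟨m, rfl⟩
      rw [pvScanGo, pvScanGo]
      cases hF : pvFindTok (c :: t) with
      | none =>
        show c :: pvScanGo n t = c :: pvScanGo m t
        rw [ih m t (by simpa using h1) (by simpa using h2)]
      | some kv =>
        show kv.2 ++ pvScanGo n ((c::t).drop kv.1.length) = kv.2 ++ pvScanGo m ((c::t).drop kv.1.length)
        have hk := pvFindTok_key_pos hF
        have hd : ((c::t).drop kv.1.length).length ≤ n := by simp at h1 ⊢; omega
        have hd2 : ((c::t).drop kv.1.length).length ≤ m := by simp at h2 ⊢; omega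
        rw [ih m _ hd hd2]

theorem pvScan_nil : pvScan [] = [] := rfl

theorem pvScan_cons_some {c : Char} {t : List Char} {kv : List Char × List Char}
    (h : pvFindTok (c :: t) = some kv) :
    pvScan (c :: t) = kv.2 ++ pvScan ((c :: t).drop kv.1.length) := by
  show pvScanGo (t.length + 1) (c::t) = _
  rw [pvScanGo, h]
  have hk := pvFindTok_key_pos h
  show kv.2 ++ pvScanGo t.length ((c::t).drop kv.1.length) = _
  rw [pvScanGo_congr t.length ((c::t).drop kv.1.length).length _ (by simp; omega) (le_refl _)]
  rfl

theorem pvScan_cons_none {c : Char} {t : List Char} (h : pvFindTok (c :: t) = none) :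
    pvScan (c :: t) = c :: pvScan t := by
  show pvScanGo (t.length + 1) (c::t) = _
  rw [pvScanGo, h]
  rfl

theorem scanStep (k v r : List Char) (hfind : pvFindTok (k ++ r) = some (k, v)) (hk : k ≠ []) :
    pvScan (k ++ r) = v ++ pvScan r := by
  obtain ⟨a, k', rfl⟩ : ∃ a k', k = a :: k' := by
    cases k with | nil => exact absurd rfl hk | cons a b => exact ⟨a, b, rfl⟩
  rw [show (a::k') ++ r = a :: (k' ++ r) from rfl] at hfind
  rw [show (a::k') ++ r = a :: (k' ++ r) from rfl, pvScan_cons_some hfind]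
  rw [show a :: (k' ++ r) = (a::k') ++ r from rfl, show ((a::k') : List Char).length = (a::k').length from rfl,
     List.drop_left]

-- ---- the 'no overlapping match' certificate and its consequences ----
-- pvClash k p: at every start offset j inside k, p disagrees with k within k itself
def pvClash (k p : List Char) : Bool :=
  (List.range k.length).all fun j =>
    (List.range p.length).any fun m => decide (j+m < k.length) && (k[j+m]? != p[m]?)

theorem prefix_getElem? {p l : List Char} (h : p.isPrefixOf l = true) (m : Nat)
    (hm : m < p.length) : l[m]? = p[m]? := by
  rw [List.isPrefixOf_iff_prefix] at h; obtain ⟨r, rfl⟩ := h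
  rw [List.getElem?_append_left (by omega)]

theorem pvClash_spec {k p : List Char} (hc : pvClash k p = true) {j : Nat} (hj : j < k.length) :
    ∃ m, m < p.length ∧ j + m < k.length ∧ k[j+m]? ≠ p[m]? := by
  simp only [pvClash, List.all_eq_true, List.mem_range] at hc
  have h2 := hc j hj
  simp only [List.any_eq_true, List.mem_range, Bool.and_eq_true, decide_eq_true_eq,
    bne_iff_ne] at h2
  obtain ⟨m, hm, hmp⟩ := h2
  exact ⟨m, hm, hmp.1, hmp.2⟩

theorem clash_notPrefix {k p : List Char} (hc : pvClash k p = true) :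
    ∀ j, j < k.length → ∀ r, ¬ p.isPrefixOf (k.drop j ++ r) = true := by
  intro j hj r hpre
  obtain ⟨m, hm, hjm, hne⟩ := pvClash_spec hc hj
  apply hne
  have h1 : (k.drop j ++ r)[m]? = p[m]? := prefix_getElem? hpre m hm
  rw [List.getElem?_append_left (by simp only [List.length_drop]; omega), List.getElem?_drop] at h1
  exact h1

theorem clash_notPrefix' {k p : List Char} (hc : pvClash k p = true) :
    ∀ j, j < k.length → ∀ x, ¬ (k.drop j).isPrefixOf (p ++ x) = true := by
  intro j hj x hpre
  obtain ⟨m, hm, hjm, hne⟩ := pvClash_spec hc hj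
  apply hne
  have h1 : (p ++ x)[m]? = (k.drop j)[m]? :=
    prefix_getElem? hpre m (by simp only [List.length_drop]; omega)
  rw [List.getElem?_append_left hm, List.getElem?_drop] at h1
  exact h1.symm

-- ---- prefixes pass unchanged through a replace pass that cannot match inside them ----
theorem prepend1 (old new : List Char) :
    ∀ k, (∀ j, j < k.length → ∀ r', ¬ old.isPrefixOf (k.drop j ++ r') = true) →
    ∀ r, PySem.Chars.replace (k ++ r) old new = k ++ PySem.Chars.replace r old new := by
  intro k
  induction k with
  | nil => intro h r; rfl
  | cons c k' ih =>
    intro h r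
    have h0 : ¬ old.isPrefixOf (c :: (k' ++ r)) = true := by
      have := h 0 (by simp) r; simpa using this
    show PySem.Chars.replace (c :: (k' ++ r)) old new = _
    rw [R2 _ _ _ _ h0,
       ih (fun j hj r' => by have := h (j+1) (by simp; omega) r'; simpa using this) r]
    rfl

def pvApply (l : List (List Char × List Char)) (s : List Char) : List Char :=
  l.foldl (fun s kv => PySem.Chars.replace s kv.1 kv.2) s

theorem pvApply_append (a b : List (List Char × List Char)) (s : List Char) :
    pvApply (a ++ b) s = pvApply b (pvApply a s) := by
  simp [pvApply, List.foldl_append]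

theorem pvApply_cons (kv : List Char × List Char) (l : List (List Char × List Char))
    (x : List Char) : pvApply (kv :: l) x = pvApply l (PySem.Chars.replace x kv.1 kv.2) := rfl

theorem pvApply_nil : ∀ (l : List (List Char × List Char)), (∀ kv ∈ l, kv.1 ≠ []) →
    pvApply l [] = [] := by
  intro l
  induction l with
  | nil => intro h; rfl
  | cons kv l' ih =>
    intro h
    show pvApply l' (PySem.Chars.replace [] kv.1 kv.2) = []
    rw [R0 _ _ (h kv (by simp))]
    exact ih (fun kv' hkv' => h kv' (by simp [hkv']))

theorem prependAll : ∀ (l : List (List Char × List Char)) (k : List Char),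
    (∀ kv ∈ l, ∀ j, j < k.length → ∀ r', ¬ kv.1.isPrefixOf (k.drop j ++ r') = true) →
    ∀ x, pvApply l (k ++ x) = k ++ pvApply l x := by
  intro l
  induction l with
  | nil => intro k h x; rfl
  | cons kv l' ih =>
    intro k h x
    show pvApply l' (PySem.Chars.replace (k ++ x) kv.1 kv.2) =
      k ++ pvApply l' (PySem.Chars.replace x kv.1 kv.2)
    rw [prepend1 kv.1 kv.2 k (h kv (by simp)) x]
    exact ih k (fun kv' hkv' => h kv' (by simp [hkv'])) _

-- A's eleven passes on a string starting with token k: all passes before/after the k-pass keep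
-- the front intact, the k-pass consumes it
theorem tokStepA (pre post : List (List Char × List Char)) (k v r : List Char)
    (htab : pvTable = pre ++ (k, v) :: post)
    (hk : k ≠ [])
    (hpre : ∀ kv ∈ pre, pvClash k kv.1 = true)
    (hpost : ∀ kv ∈ post, pvClash v kv.1 = true) :
    pvApply pvTable (k ++ r) = v ++ pvApply pvTable r := by
  rw [htab, pvApply_append, pvApply_append]
  rw [prependAll pre k (fun kv hkv => clash_notPrefix (hpre kv hkv)) r]
  show pvApply post (PySem.Chars.replace (k ++ pvApply pre r) k v) =
    v ++ pvApply post (PySem.Chars.replace (pvApply pre r) k v)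
  rw [R1 _ _ _ hk]
  exact prependAll post v (fun kv hkv => clash_notPrefix (hpost kv hkv)) _

-- A's eleven passes on c :: x copy c when no pass can match at the front it sees
theorem headStep (c : Char) : ∀ (l : List (List Char × List Char)) (x : List Char),
    (∀ i, (hi : i < l.length) → ¬ (l[i].1.isPrefixOf (c :: pvApply (l.take i) x)) = true) →
    pvApply l (c :: x) = c :: pvApply l x := by
  intro l
  induction l with
  | nil => intro x h; rfl
  | cons kv l' ih =>
    intro x h
    have h0 : ¬ kv.1.isPrefixOf (c :: x) = true := by simpa [pvApply] using h 0 (by simp)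
    show pvApply l' (PySem.Chars.replace (c :: x) kv.1 kv.2) =
      c :: pvApply l' (PySem.Chars.replace x kv.1 kv.2)
    rw [R2 _ _ _ _ h0]
    exact ih _ (fun i hi => by
      have := h (i+1) (by simpa using hi)
      simpa [List.take_succ_cons, pvApply] using this)

-- a pattern whose every nonempty suffix disagrees with `new` cannot newly appear at the front of
-- a replaced string
theorem front1_aux (old new p : List Char) (hold : old ≠ []) (hs : pvClash p new = true) :
    ∀ n t, t.length ≤ n → ∀ j, j < p.length →
      (p.drop j).isPrefixOf (PySem.Chars.replace t old new) = true →
      (p.drop j).isPrefixOf t = true := by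
  intro n
  induction n with
  | zero =>
    intro t ht j hj h
    have hnil : t = [] := by cases t with | nil => rfl | cons a b => simp at ht
    subst hnil
    rw [R0 _ _ hold] at h
    rw [List.isPrefixOf_iff_prefix] at h
    have : p.drop j = [] := List.prefix_nil.mp h
    have := congrArg List.length this
    simp at this; omega
  | succ n ih =>
    intro t ht j hj h
    cases t with
    | nil =>
      rw [R0 _ _ hold] at h
      rw [List.isPrefixOf_iff_prefix] at h
      have : p.drop j = [] := List.prefix_nil.mp h
      have := congrArg List.length this
      simp at this; omega
    | cons c t' =>
      by_cases hp : old.isPrefixOf (c::t') = true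
      · exfalso
        rw [List.isPrefixOf_iff_prefix] at hp
        obtain ⟨r, hr⟩ := hp
        rw [← hr, R1 _ _ _ hold] at h
        exact clash_notPrefix' hs j hj _ h
      · rw [R2 _ _ _ _ hp] at h
        rw [List.drop_eq_getElem_cons hj] at h ⊢
        rw [List.isPrefixOf_iff_prefix, List.cons_prefix_cons] at h ⊢
        obtain ⟨hc, h2⟩ := h
        refine ⟨hc, ?_⟩
        by_cases hj1 : j + 1 < p.length
        · have := ih t' (by simp at ht; omega) (j+1) hj1
            (List.isPrefixOf_iff_prefix.mpr h2)
          exact List.isPrefixOf_iff_prefix.mp this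
        · have hnil : p.drop (j+1) = [] := by
            rw [List.drop_eq_nil_iff]; omega
          rw [hnil]; exact List.nil_prefix

theorem front1 (old new p t : List Char) (hold : old ≠ []) (hs : pvClash p new = true)
    (h : p.isPrefixOf (PySem.Chars.replace t old new) = true) : p.isPrefixOf t = true := by
  cases p with
  | nil => rw [List.isPrefixOf_iff_prefix]; exact List.nil_prefix
  | cons a p' =>
    have := front1_aux old new (a::p') hold hs t.length t (le_refl _) 0 (by simp)
      (by simpa using h)
    simpa using this

-- chains front1 through A's earlier passes
theorem chainFront : ∀ (l : List (List Char × List Char)) (p : List Char),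
    (∀ kv ∈ l, kv.1 ≠ [] ∧ pvClash p kv.2 = true) →
    ∀ t, p.isPrefixOf (pvApply l t) = true → p.isPrefixOf t = true := by
  intro l
  induction l with
  | nil => intro p h t ht; exact ht
  | cons kv l' ih =>
    intro p h t ht
    have h1 : p.isPrefixOf (pvApply l' (PySem.Chars.replace t kv.1 kv.2)) = true := ht
    have h2 := ih p (fun kv' hk => h kv' (by simp [hk])) _ h1
    exact front1 kv.1 kv.2 p t (h kv (by simp)).1 (h kv (by simp)).2 h2

-- the single cascade: 'truct' appears at the front of the Tuple-pass output only if it was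
-- already there or the input began with 'trucTuple'
theorem pvL5 (Y : List Char)
    (h1 : ¬ ['t','r','u','c','t'].isPrefixOf Y = true)
    (h2 : ¬ ['t','r','u','c','T','u','p','l','e'].isPrefixOf Y = true) :
    ¬ ['t','r','u','c','t'].isPrefixOf
        (PySem.Chars.replace Y ['T','u','p','l','e'] ['t','u','p','l','e']) = true := by
  intro h
  have htup : (['T','u','p','l','e'] : List Char) ≠ [] := by decide
  rcases Y with _ | ⟨a, Y1⟩
  · rw [R0 _ _ htup] at h; simp [List.isPrefixOf] at h
  by_cases hp : (['T','u','p','l','e'] : List Char).isPrefixOf (a :: Y1) = true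
  · rw [List.isPrefixOf_iff_prefix] at hp
    obtain ⟨r, hr⟩ := hp
    rw [← hr, R1 _ _ _ htup] at h
    simp [List.isPrefixOf] at h
  rw [R2 _ _ _ _ hp] at h
  rw [List.isPrefixOf_iff_prefix, List.cons_prefix_cons] at h
  obtain ⟨rfl, h⟩ := h
  rcases Y1 with _ | ⟨b, Y2⟩
  · rw [R0 _ _ htup] at h; simp at h
  by_cases hp1 : (['T','u','p','l','e'] : List Char).isPrefixOf (b :: Y2) = true
  · rw [List.isPrefixOf_iff_prefix] at hp1
    obtain ⟨r, hr⟩ := hp1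
    rw [← hr, R1 _ _ _ htup] at h
    simp [List.cons_prefix_cons] at h
  rw [R2 _ _ _ _ hp1] at h
  rw [List.cons_prefix_cons] at h
  obtain ⟨rfl, h⟩ := h
  rcases Y2 with _ | ⟨c, Y3⟩
  · rw [R0 _ _ htup] at h; simp at h
  by_cases hp2 : (['T','u','p','l','e'] : List Char).isPrefixOf (c :: Y3) = true
  · rw [List.isPrefixOf_iff_prefix] at hp2
    obtain ⟨r, hr⟩ := hp2
    rw [← hr, R1 _ _ _ htup] at h
    simp [List.cons_prefix_cons] at h
  rw [R2 _ _ _ _ hp2] at h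
  rw [List.cons_prefix_cons] at h
  obtain ⟨rfl, h⟩ := h
  rcases Y3 with _ | ⟨d, Y4⟩
  · rw [R0 _ _ htup] at h; simp at h
  by_cases hp3 : (['T','u','p','l','e'] : List Char).isPrefixOf (d :: Y4) = true
  · rw [List.isPrefixOf_iff_prefix] at hp3
    obtain ⟨r, hr⟩ := hp3
    rw [← hr, R1 _ _ _ htup] at h
    simp [List.cons_prefix_cons] at h
  rw [R2 _ _ _ _ hp3] at h
  rw [List.cons_prefix_cons] at h
  obtain ⟨rfl, h⟩ := h
  -- h : ['t'] <+: replace Y4 Tuple tuple, with Y = 't'::'r'::'u'::'c'::Y4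
  by_cases hp4 : (['T','u','p','l','e'] : List Char).isPrefixOf Y4 = true
  · rw [List.isPrefixOf_iff_prefix] at hp4
    obtain ⟨r, hr⟩ := hp4
    apply h2
    rw [List.isPrefixOf_iff_prefix, ← hr]
    simp [List.cons_prefix_cons]
  rcases Y4 with _ | ⟨e, Y5⟩
  · rw [R0 _ _ htup] at h; simp at h
  rw [R2 _ _ _ _ hp4] at h
  rw [List.cons_prefix_cons] at h
  obtain ⟨rfl, -⟩ := h
  apply h1
  rw [List.isPrefixOf_iff_prefix]
  simp [List.cons_prefix_cons]

def pvST : List Char := ['S','t','r','u','c','T','u','p','l','e']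

-- every pass sees a front at which its key cannot match, provided no key matched the original
-- front and the string does not begin with 'StrucTuple'
theorem headCond (c : Char) (t : List Char)
    (hnone : ∀ kv ∈ pvTable, ¬ (kv.1.isPrefixOf (c :: t)) = true)
    (hpfx : ¬ pvST <+: (c :: t)) :
    ∀ i, (hi : i < pvTable.length) →
      ¬ (pvTable[i].1.isPrefixOf (c :: pvApply (pvTable.take i) t)) = true := by
  intro i hi
  have hi11 : i < 11 := by simpa [pvTable] using hi
  interval_cases i <;>
    simp only [pvTable, List.getElem_cons_zero, List.getElem_cons_succ,
      List.take_succ_cons, List.take_zero]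
  · -- i = 0, key 'String'
    exact hnone (['S','t','r','i','n','g'], ['s','t','r']) (by decide)
  · -- i = 1, key 'Array'
    intro hcon
    obtain ⟨hc, htail⟩ := List.cons_prefix_cons.mp (List.isPrefixOf_iff_prefix.mp hcon)
    have hT := chainFront [(['S','t','r','i','n','g'], ['s','t','r'])] ['r','r','a','y'] (by decide) t
      (List.isPrefixOf_iff_prefix.mpr htail)
    exact hnone (['A','r','r','a','y'], ['a','r','r','a','y']) (by decide)
      (List.isPrefixOf_iff_prefix.mpr
        (List.cons_prefix_cons.mpr ⟨hc, List.isPrefixOf_iff_prefix.mp hT⟩))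
  · -- i = 2, key 'Set'
    intro hcon
    obtain ⟨hc, htail⟩ := List.cons_prefix_cons.mp (List.isPrefixOf_iff_prefix.mp hcon)
    have hT := chainFront [(['S','t','r','i','n','g'], ['s','t','r']), (['A','r','r','a','y'], ['a','r','r','a','y'])] ['e','t'] (by decide) t
      (List.isPrefixOf_iff_prefix.mpr htail)
    exact hnone (['S','e','t'], ['s','e','t']) (by decide)
      (List.isPrefixOf_iff_prefix.mpr
        (List.cons_prefix_cons.mpr ⟨hc, List.isPrefixOf_iff_prefix.mp hT⟩))
  · -- i = 3, key 'Tuple'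
    intro hcon
    obtain ⟨hc, htail⟩ := List.cons_prefix_cons.mp (List.isPrefixOf_iff_prefix.mp hcon)
    have hT := chainFront [(['S','t','r','i','n','g'], ['s','t','r']), (['A','r','r','a','y'], ['a','r','r','a','y']), (['S','e','t'], ['s','e','t'])] ['u','p','l','e'] (by decide) t
      (List.isPrefixOf_iff_prefix.mpr htail)
    exact hnone (['T','u','p','l','e'], ['t','u','p','l','e']) (by decide)
      (List.isPrefixOf_iff_prefix.mpr
        (List.cons_prefix_cons.mpr ⟨hc, List.isPrefixOf_iff_prefix.mp hT⟩))
  · -- i = 4, key 'Struct': the cascade stage, uses pvL5 and the no-'StrucTuple' hypothesis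
    intro hcon
    obtain ⟨hc, htail⟩ := List.cons_prefix_cons.mp (List.isPrefixOf_iff_prefix.mp hcon)
    have e : pvApply [(['S','t','r','i','n','g'], ['s','t','r']), (['A','r','r','a','y'], ['a','r','r','a','y']), (['S','e','t'], ['s','e','t']), (['T','u','p','l','e'], ['t','u','p','l','e'])] t =
        PySem.Chars.replace (pvApply [(['S','t','r','i','n','g'], ['s','t','r']), (['A','r','r','a','y'], ['a','r','r','a','y']), (['S','e','t'], ['s','e','t'])] t) ['T','u','p','l','e'] ['t','u','p','l','e'] := by
      rw [show [(['S','t','r','i','n','g'], ['s','t','r']), (['A','r','r','a','y'], ['a','r','r','a','y']), (['S','e','t'], ['s','e','t']), (['T','u','p','l','e'], ['t','u','p','l','e'])] = [(['S','t','r','i','n','g'], ['s','t','r']), (['A','r','r','a','y'], ['a','r','r','a','y']), (['S','e','t'], ['s','e','t'])] ++ [(['T','u','p','l','e'], ['t','u','p','l','e'])] from rfl,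
         pvApply_append]
      rfl
    have hA : ¬ ['t','r','u','c','t'].isPrefixOf (pvApply [(['S','t','r','i','n','g'], ['s','t','r']), (['A','r','r','a','y'], ['a','r','r','a','y']), (['S','e','t'], ['s','e','t'])] t) = true := by
      intro hx
      have hT := chainFront [(['S','t','r','i','n','g'], ['s','t','r']), (['A','r','r','a','y'], ['a','r','r','a','y']), (['S','e','t'], ['s','e','t'])] ['t','r','u','c','t'] (by decide) t hx
      exact hnone (['S','t','r','u','c','t'], ['s','t','r','u','c','t']) (by decide)
        (List.isPrefixOf_iff_prefix.mpr
  (List.cons_prefix_cons.mpr ⟨hc, List.isPrefixOf_iff_prefix.mp hT⟩))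
    have hB : ¬ ['t','r','u','c','T','u','p','l','e'].isPrefixOf (pvApply [(['S','t','r','i','n','g'], ['s','t','r']), (['A','r','r','a','y'], ['a','r','r','a','y']), (['S','e','t'], ['s','e','t'])] t) = true := by
      intro hx
      have hT := chainFront [(['S','t','r','i','n','g'], ['s','t','r']), (['A','r','r','a','y'], ['a','r','r','a','y']), (['S','e','t'], ['s','e','t'])] ['t','r','u','c','T','u','p','l','e'] (by decide) t hx
      exact hpfx (List.cons_prefix_cons.mpr ⟨hc, List.isPrefixOf_iff_prefix.mp hT⟩)
    exact pvL5 _ hA hB (e ▸ List.isPrefixOf_iff_prefix.mpr htail)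
  · -- i = 5, key '['
    intro hcon
    obtain ⟨hc, -⟩ := List.cons_prefix_cons.mp (List.isPrefixOf_iff_prefix.mp hcon)
    exact hnone (['['], ['<']) (by decide)
      (List.isPrefixOf_iff_prefix.mpr (List.cons_prefix_cons.mpr ⟨hc, List.nil_prefix⟩))
  · -- i = 6, key ']'
    intro hcon
    obtain ⟨hc, -⟩ := List.cons_prefix_cons.mp (List.isPrefixOf_iff_prefix.mp hcon)
    exact hnone ([']'], ['>']) (by decide)
      (List.isPrefixOf_iff_prefix.mpr (List.cons_prefix_cons.mpr ⟨hc, List.nil_prefix⟩))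
  · -- i = 7, key 'Int32'
    intro hcon
    obtain ⟨hc, htail⟩ := List.cons_prefix_cons.mp (List.isPrefixOf_iff_prefix.mp hcon)
    have hT := chainFront [(['S','t','r','i','n','g'], ['s','t','r']), (['A','r','r','a','y'], ['a','r','r','a','y']), (['S','e','t'], ['s','e','t']), (['T','u','p','l','e'], ['t','u','p','l','e']), (['S','t','r','u','c','t'], ['s','t','r','u','c','t']), (['['], ['<']), ([']'], ['>'])] ['n','t','3','2'] (by decide) t
      (List.isPrefixOf_iff_prefix.mpr htail)
    exact hnone (['I','n','t','3','2'], ['i','n','t','3','2']) (by decide)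
      (List.isPrefixOf_iff_prefix.mpr
        (List.cons_prefix_cons.mpr ⟨hc, List.isPrefixOf_iff_prefix.mp hT⟩))
  · -- i = 8, key 'Int64'
    intro hcon
    obtain ⟨hc, htail⟩ := List.cons_prefix_cons.mp (List.isPrefixOf_iff_prefix.mp hcon)
    have hT := chainFront [(['S','t','r','i','n','g'], ['s','t','r']), (['A','r','r','a','y'], ['a','r','r','a','y']), (['S','e','t'], ['s','e','t']), (['T','u','p','l','e'], ['t','u','p','l','e']), (['S','t','r','u','c','t'], ['s','t','r','u','c','t']), (['['], ['<']), ([']'], ['>']), (['I','n','t','3','2'], ['i','n','t','3','2'])] ['n','t','6','4'] (by decide) t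
      (List.isPrefixOf_iff_prefix.mpr htail)
    exact hnone (['I','n','t','6','4'], ['i','n','t','6','4']) (by decide)
      (List.isPrefixOf_iff_prefix.mpr
        (List.cons_prefix_cons.mpr ⟨hc, List.isPrefixOf_iff_prefix.mp hT⟩))
  · -- i = 9, key 'Float64'
    intro hcon
    obtain ⟨hc, htail⟩ := List.cons_prefix_cons.mp (List.isPrefixOf_iff_prefix.mp hcon)
    have hT := chainFront [(['S','t','r','i','n','g'], ['s','t','r']), (['A','r','r','a','y'], ['a','r','r','a','y']), (['S','e','t'], ['s','e','t']), (['T','u','p','l','e'], ['t','u','p','l','e']), (['S','t','r','u','c','t'], ['s','t','r','u','c','t']), (['['], ['<']), ([']'], ['>']), (['I','n','t','3','2'], ['i','n','t','3','2']), (['I','n','t','6','4'], ['i','n','t','6','4'])] ['l','o','a','t','6','4'] (by decide) t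
      (List.isPrefixOf_iff_prefix.mpr htail)
    exact hnone (['F','l','o','a','t','6','4'], ['f','l','o','a','t','6','4']) (by decide)
      (List.isPrefixOf_iff_prefix.mpr
        (List.cons_prefix_cons.mpr ⟨hc, List.isPrefixOf_iff_prefix.mp hT⟩))
  · -- i = 10, key 'Float32'
    intro hcon
    obtain ⟨hc, htail⟩ := List.cons_prefix_cons.mp (List.isPrefixOf_iff_prefix.mp hcon)
    have hT := chainFront [(['S','t','r','i','n','g'], ['s','t','r']), (['A','r','r','a','y'], ['a','r','r','a','y']), (['S','e','t'], ['s','e','t']), (['T','u','p','l','e'], ['t','u','p','l','e']), (['S','t','r','u','c','t'], ['s','t','r','u','c','t']), (['['], ['<']), ([']'], ['>']), (['I','n','t','3','2'], ['i','n','t','3','2']), (['I','n','t','6','4'], ['i','n','t','6','4']), (['F','l','o','a','t','6','4'], ['f','l','o','a','t','6','4'])] ['l','o','a','t','3','2'] (by decide) t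
      (List.isPrefixOf_iff_prefix.mpr htail)
    exact hnone (['F','l','o','a','t','3','2'], ['f','l','o','a','t','3','2']) (by decide)
      (List.isPrefixOf_iff_prefix.mpr
        (List.cons_prefix_cons.mpr ⟨hc, List.isPrefixOf_iff_prefix.mp hT⟩))

-- ---- the main equivalence on character lists ----
theorem pvMain : ∀ n cs, cs.length ≤ n → ¬ (pvST <:+: cs) →
    pvApply pvTable cs = pvScan cs := by
  intro n
  induction n with
  | zero =>
    intro cs hlen hST
    have : cs = [] := by cases cs with | nil => rfl | cons a b => simp at hlen
    subst this
    rw [pvScan_nil, pvApply_nil pvTable (by decide)]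
  | succ n ih =>
    intro cs hlen hST
    cases cs with
    | nil => rw [pvScan_nil, pvApply_nil pvTable (by decide)]
    | cons c t =>
      cases hF : pvFindTok (c :: t) with
      | some kv =>
        have hmem := List.mem_of_find?_eq_some hF
        have hkpre : kv.1.isPrefixOf (c :: t) = true := by
          have := List.find?_some hF; simpa using this
        rw [List.isPrefixOf_iff_prefix] at hkpre
        obtain ⟨r, hr⟩ := hkpre
        obtain ⟨kk, vv⟩ := kv
        simp only [pvTable, List.mem_cons, List.not_mem_nil, or_false] at hmem
        simp only [] at hr
        rcases hmem with hkv|hkv|hkv|hkv|hkv|hkv|hkv|hkv|hkv|hkv|hkv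
        · -- token 'String'
          obtain ⟨rfl, rfl⟩ := Prod.mk.injEq .. |>.mp hkv
          rw [← hr] at hF ⊢
          have hlr : r.length ≤ n := by
            have := congrArg List.length hr; simp at this hlen; omega
          rw [tokStepA ([] : List (List Char × List Char)) [(['A','r','r','a','y'], ['a','r','r','a','y']), (['S','e','t'], ['s','e','t']), (['T','u','p','l','e'], ['t','u','p','l','e']), (['S','t','r','u','c','t'], ['s','t','r','u','c','t']), (['['], ['<']), ([']'], ['>']), (['I','n','t','3','2'], ['i','n','t','3','2']), (['I','n','t','6','4'], ['i','n','t','6','4']), (['F','l','o','a','t','6','4'], ['f','l','o','a','t','6','4']), (['F','l','o','a','t','3','2'], ['f','l','o','a','t','3','2'])] ['S','t','r','i','n','g'] ['s','t','r'] r (by decide) (by decide)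
              (by decide) (by decide),
            scanStep _ _ _ hF (by decide),
            ih r hlr (fun hx => hST (hr ▸ hx.trans (List.infix_append_right)))]
        · -- token 'Array'
          obtain ⟨rfl, rfl⟩ := Prod.mk.injEq .. |>.mp hkv
          rw [← hr] at hF ⊢
          have hlr : r.length ≤ n := by
            have := congrArg List.length hr; simp at this hlen; omega
          rw [tokStepA [(['S','t','r','i','n','g'], ['s','t','r'])] [(['S','e','t'], ['s','e','t']), (['T','u','p','l','e'], ['t','u','p','l','e']), (['S','t','r','u','c','t'], ['s','t','r','u','c','t']), (['['], ['<']), ([']'], ['>']), (['I','n','t','3','2'], ['i','n','t','3','2']), (['I','n','t','6','4'], ['i','n','t','6','4']), (['F','l','o','a','t','6','4'], ['f','l','o','a','t','6','4']), (['F','l','o','a','t','3','2'], ['f','l','o','a','t','3','2'])] ['A','r','r','a','y'] ['a','r','r','a','y'] r (by decide) (by decide)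
              (by decide) (by decide),
            scanStep _ _ _ hF (by decide),
            ih r hlr (fun hx => hST (hr ▸ hx.trans (List.infix_append_right)))]
        · -- token 'Set'
          obtain ⟨rfl, rfl⟩ := Prod.mk.injEq .. |>.mp hkv
          rw [← hr] at hF ⊢
          have hlr : r.length ≤ n := by
            have := congrArg List.length hr; simp at this hlen; omega
          rw [tokStepA [(['S','t','r','i','n','g'], ['s','t','r']), (['A','r','r','a','y'], ['a','r','r','a','y'])] [(['T','u','p','l','e'], ['t','u','p','l','e']), (['S','t','r','u','c','t'], ['s','t','r','u','c','t']), (['['], ['<']), ([']'], ['>']), (['I','n','t','3','2'], ['i','n','t','3','2']), (['I','n','t','6','4'], ['i','n','t','6','4']), (['F','l','o','a','t','6','4'], ['f','l','o','a','t','6','4']), (['F','l','o','a','t','3','2'], ['f','l','o','a','t','3','2'])] ['S','e','t'] ['s','e','t'] r (by decide) (by decide)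
              (by decide) (by decide),
            scanStep _ _ _ hF (by decide),
            ih r hlr (fun hx => hST (hr ▸ hx.trans (List.infix_append_right)))]
        · -- token 'Tuple'
          obtain ⟨rfl, rfl⟩ := Prod.mk.injEq .. |>.mp hkv
          rw [← hr] at hF ⊢
          have hlr : r.length ≤ n := by
            have := congrArg List.length hr; simp at this hlen; omega
          rw [tokStepA [(['S','t','r','i','n','g'], ['s','t','r']), (['A','r','r','a','y'], ['a','r','r','a','y']), (['S','e','t'], ['s','e','t'])] [(['S','t','r','u','c','t'], ['s','t','r','u','c','t']), (['['], ['<']), ([']'], ['>']), (['I','n','t','3','2'], ['i','n','t','3','2']), (['I','n','t','6','4'], ['i','n','t','6','4']), (['F','l','o','a','t','6','4'], ['f','l','o','a','t','6','4']), (['F','l','o','a','t','3','2'], ['f','l','o','a','t','3','2'])] ['T','u','p','l','e'] ['t','u','p','l','e'] r (by decide) (by decide)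
              (by decide) (by decide),
            scanStep _ _ _ hF (by decide),
            ih r hlr (fun hx => hST (hr ▸ hx.trans (List.infix_append_right)))]
        · -- token 'Struct'
          obtain ⟨rfl, rfl⟩ := Prod.mk.injEq .. |>.mp hkv
          rw [← hr] at hF ⊢
          have hlr : r.length ≤ n := by
            have := congrArg List.length hr; simp at this hlen; omega
          rw [tokStepA [(['S','t','r','i','n','g'], ['s','t','r']), (['A','r','r','a','y'], ['a','r','r','a','y']), (['S','e','t'], ['s','e','t']), (['T','u','p','l','e'], ['t','u','p','l','e'])] [(['['], ['<']), ([']'], ['>']), (['I','n','t','3','2'], ['i','n','t','3','2']), (['I','n','t','6','4'], ['i','n','t','6','4']), (['F','l','o','a','t','6','4'], ['f','l','o','a','t','6','4']), (['F','l','o','a','t','3','2'], ['f','l','o','a','t','3','2'])] ['S','t','r','u','c','t'] ['s','t','r','u','c','t'] r (by decide) (by decide)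
              (by decide) (by decide),
            scanStep _ _ _ hF (by decide),
            ih r hlr (fun hx => hST (hr ▸ hx.trans (List.infix_append_right)))]
        · -- token '['
          obtain ⟨rfl, rfl⟩ := Prod.mk.injEq .. |>.mp hkv
          rw [← hr] at hF ⊢
          have hlr : r.length ≤ n := by
            have := congrArg List.length hr; simp at this hlen; omega
          rw [tokStepA [(['S','t','r','i','n','g'], ['s','t','r']), (['A','r','r','a','y'], ['a','r','r','a','y']), (['S','e','t'], ['s','e','t']), (['T','u','p','l','e'], ['t','u','p','l','e']), (['S','t','r','u','c','t'], ['s','t','r','u','c','t'])] [([']'], ['>']), (['I','n','t','3','2'], ['i','n','t','3','2']), (['I','n','t','6','4'], ['i','n','t','6','4']), (['F','l','o','a','t','6','4'], ['f','l','o','a','t','6','4']), (['F','l','o','a','t','3','2'], ['f','l','o','a','t','3','2'])] ['['] ['<'] r (by decide) (by decide)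
              (by decide) (by decide),
            scanStep _ _ _ hF (by decide),
            ih r hlr (fun hx => hST (hr ▸ hx.trans (List.infix_append_right)))]
        · -- token ']'
          obtain ⟨rfl, rfl⟩ := Prod.mk.injEq .. |>.mp hkv
          rw [← hr] at hF ⊢
          have hlr : r.length ≤ n := by
            have := congrArg List.length hr; simp at this hlen; omega
          rw [tokStepA [(['S','t','r','i','n','g'], ['s','t','r']), (['A','r','r','a','y'], ['a','r','r','a','y']), (['S','e','t'], ['s','e','t']), (['T','u','p','l','e'], ['t','u','p','l','e']), (['S','t','r','u','c','t'], ['s','t','r','u','c','t']), (['['], ['<'])] [(['I','n','t','3','2'], ['i','n','t','3','2']), (['I','n','t','6','4'], ['i','n','t','6','4']), (['F','l','o','a','t','6','4'], ['f','l','o','a','t','6','4']), (['F','l','o','a','t','3','2'], ['f','l','o','a','t','3','2'])] [']'] ['>'] r (by decide) (by decide)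
              (by decide) (by decide),
            scanStep _ _ _ hF (by decide),
            ih r hlr (fun hx => hST (hr ▸ hx.trans (List.infix_append_right)))]
        · -- token 'Int32'
          obtain ⟨rfl, rfl⟩ := Prod.mk.injEq .. |>.mp hkv
          rw [← hr] at hF ⊢
          have hlr : r.length ≤ n := by
            have := congrArg List.length hr; simp at this hlen; omega
          rw [tokStepA [(['S','t','r','i','n','g'], ['s','t','r']), (['A','r','r','a','y'], ['a','r','r','a','y']), (['S','e','t'], ['s','e','t']), (['T','u','p','l','e'], ['t','u','p','l','e']), (['S','t','r','u','c','t'], ['s','t','r','u','c','t']), (['['], ['<']), ([']'], ['>'])] [(['I','n','t','6','4'], ['i','n','t','6','4']), (['F','l','o','a','t','6','4'], ['f','l','o','a','t','6','4']), (['F','l','o','a','t','3','2'], ['f','l','o','a','t','3','2'])] ['I','n','t','3','2'] ['i','n','t','3','2'] r (by decide) (by decide)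
              (by decide) (by decide),
            scanStep _ _ _ hF (by decide),
            ih r hlr (fun hx => hST (hr ▸ hx.trans (List.infix_append_right)))]
        · -- token 'Int64'
          obtain ⟨rfl, rfl⟩ := Prod.mk.injEq .. |>.mp hkv
          rw [← hr] at hF ⊢
          have hlr : r.length ≤ n := by
            have := congrArg List.length hr; simp at this hlen; omega
          rw [tokStepA [(['S','t','r','i','n','g'], ['s','t','r']), (['A','r','r','a','y'], ['a','r','r','a','y']), (['S','e','t'], ['s','e','t']), (['T','u','p','l','e'], ['t','u','p','l','e']), (['S','t','r','u','c','t'], ['s','t','r','u','c','t']), (['['], ['<']), ([']'], ['>']), (['I','n','t','3','2'], ['i','n','t','3','2'])] [(['F','l','o','a','t','6','4'], ['f','l','o','a','t','6','4']), (['F','l','o','a','t','3','2'], ['f','l','o','a','t','3','2'])] ['I','n','t','6','4'] ['i','n','t','6','4'] r (by decide) (by decide)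
              (by decide) (by decide),
            scanStep _ _ _ hF (by decide),
            ih r hlr (fun hx => hST (hr ▸ hx.trans (List.infix_append_right)))]
        · -- token 'Float64'
          obtain ⟨rfl, rfl⟩ := Prod.mk.injEq .. |>.mp hkv
          rw [← hr] at hF ⊢
          have hlr : r.length ≤ n := by
            have := congrArg List.length hr; simp at this hlen; omega
          rw [tokStepA [(['S','t','r','i','n','g'], ['s','t','r']), (['A','r','r','a','y'], ['a','r','r','a','y']), (['S','e','t'], ['s','e','t']), (['T','u','p','l','e'], ['t','u','p','l','e']), (['S','t','r','u','c','t'], ['s','t','r','u','c','t']), (['['], ['<']), ([']'], ['>']), (['I','n','t','3','2'], ['i','n','t','3','2']), (['I','n','t','6','4'], ['i','n','t','6','4'])] [(['F','l','o','a','t','3','2'], ['f','l','o','a','t','3','2'])] ['F','l','o','a','t','6','4'] ['f','l','o','a','t','6','4'] r (by decide) (by decide)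
              (by decide) (by decide),
            scanStep _ _ _ hF (by decide),
            ih r hlr (fun hx => hST (hr ▸ hx.trans (List.infix_append_right)))]
        · -- token 'Float32'
          obtain ⟨rfl, rfl⟩ := Prod.mk.injEq .. |>.mp hkv
          rw [← hr] at hF ⊢
          have hlr : r.length ≤ n := by
            have := congrArg List.length hr; simp at this hlen; omega
          rw [tokStepA [(['S','t','r','i','n','g'], ['s','t','r']), (['A','r','r','a','y'], ['a','r','r','a','y']), (['S','e','t'], ['s','e','t']), (['T','u','p','l','e'], ['t','u','p','l','e']), (['S','t','r','u','c','t'], ['s','t','r','u','c','t']), (['['], ['<']), ([']'], ['>']), (['I','n','t','3','2'], ['i','n','t','3','2']), (['I','n','t','6','4'], ['i','n','t','6','4']), (['F','l','o','a','t','6','4'], ['f','l','o','a','t','6','4'])] ([] : List (List Char × List Char)) ['F','l','o','a','t','3','2'] ['f','l','o','a','t','3','2'] r (by decide) (by decide)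
              (by decide) (by decide),
            scanStep _ _ _ hF (by decide),
            ih r hlr (fun hx => hST (hr ▸ hx.trans (List.infix_append_right)))]
      | none =>
        have hnone : ∀ kv ∈ pvTable, ¬ (kv.1.isPrefixOf (c :: t)) = true := by
          rw [pvFindTok, List.find?_eq_none] at hF
          exact hF
        have hcond := headCond c t hnone (fun hpfx => hST hpfx.isInfix)
        rw [headStep c pvTable t hcond, pvScan_cons_none hF,
           ih t (by simp at hlen; omega)
             (fun hx => hST (hx.trans (List.suffix_cons c t).isInfix))]

-- ---- tightness: on every string containing 'StrucTuple' the two ports differ ----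

-- an occurrence of 'StrucTuple' in k ++ r that is not a prefix lies inside r, since no
-- occurrence can start strictly inside the token k
theorem infix_append_elim (k r : List Char) (hcl : pvClash k pvST = true)
    (hinf : pvST <:+: k ++ r) (hpfx : ¬ pvST <+: k ++ r) : pvST <:+: r := by
  obtain ⟨s, u, hsu⟩ := hinf
  by_cases hs : k.length ≤ s.length
  · refine ⟨s.drop k.length, u, ?_⟩
    have h1 := congrArg (List.drop k.length) hsu
    rw [List.drop_append_of_le_length (show k.length ≤ (s ++ pvST).length by simp; omega),
        List.drop_append_of_le_length hs, List.drop_left] at h1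
    exact h1
  · exfalso
    have hs2 : s.length < k.length := by omega
    rcases Nat.eq_zero_or_pos s.length with h0 | h0
    · apply hpfx
      have hse : s = [] := List.eq_nil_of_length_eq_zero h0
      subst hse
      exact ⟨u, by simpa using hsu⟩
    · apply clash_notPrefix hcl s.length hs2 r ?_
      rw [List.isPrefixOf_iff_prefix]
      have h1 := congrArg (List.drop s.length) hsu
      rw [List.drop_append_of_le_length (show s.length ≤ (s ++ pvST).length by simp),
          List.drop_left, List.drop_append_of_le_length (le_of_lt hs2)] at h1
      exact ⟨u, h1⟩

-- A's passes on 'StrucTuple' ++ x: Tuple fires inside it, then Struct fires on the result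
theorem tightA (x : List Char) : ∃ W, pvApply pvTable (pvST ++ x) = 's' :: W := by
  rw [show pvTable = [(['S','t','r','i','n','g'], ['s','t','r']), (['A','r','r','a','y'], ['a','r','r','a','y']), (['S','e','t'], ['s','e','t'])] ++
      ((['T','u','p','l','e'], ['t','u','p','l','e']) ::
        (['S','t','r','u','c','t'], ['s','t','r','u','c','t']) :: [(['['], ['<']), ([']'], ['>']), (['I','n','t','3','2'], ['i','n','t','3','2']), (['I','n','t','6','4'], ['i','n','t','6','4']), (['F','l','o','a','t','6','4'], ['f','l','o','a','t','6','4']), (['F','l','o','a','t','3','2'], ['f','l','o','a','t','3','2'])]) from by decide,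
    pvApply_append]
  rw [prependAll [(['S','t','r','i','n','g'], ['s','t','r']), (['A','r','r','a','y'], ['a','r','r','a','y']), (['S','e','t'], ['s','e','t'])] pvST
    (fun kv hkv => clash_notPrefix (by fin_cases hkv <;> decide)) x]
  rw [pvApply_cons]
  set Y := pvApply [(['S','t','r','i','n','g'], ['s','t','r']), (['A','r','r','a','y'], ['a','r','r','a','y']), (['S','e','t'], ['s','e','t'])] x with hY
  rw [show pvST ++ Y = ['S','t','r','u','c'] ++ (['T','u','p','l','e'] ++ Y) from by
    have h : pvST = ['S','t','r','u','c'] ++ ['T','u','p','l','e'] := by decide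
    rw [h, List.append_assoc]]
  rw [prepend1 ['T','u','p','l','e'] ['t','u','p','l','e'] ['S','t','r','u','c']
    (clash_notPrefix (by decide)) _]
  rw [R1 _ _ _ (by decide), pvApply_cons]
  set Z := PySem.Chars.replace Y ['T','u','p','l','e'] ['t','u','p','l','e'] with hZ
  rw [show (['S','t','r','u','c'] : List Char) ++ (['t','u','p','l','e'] ++ Z) =
      ['S','t','r','u','c','t'] ++ (['u','p','l','e'] ++ Z) from rfl]
  rw [R1 _ _ _ (by decide)]
  set W := PySem.Chars.replace (['u','p','l','e'] ++ Z) ['S','t','r','u','c','t']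
    ['s','t','r','u','c','t'] with hW
  rw [show (['s','t','r','u','c','t'] : List Char) ++ W =
      ['s'] ++ (['t','r','u','c','t'] ++ W) from rfl]
  rw [prependAll [(['['], ['<']), ([']'], ['>']), (['I','n','t','3','2'], ['i','n','t','3','2']), (['I','n','t','6','4'], ['i','n','t','6','4']), (['F','l','o','a','t','6','4'], ['f','l','o','a','t','6','4']), (['F','l','o','a','t','3','2'], ['f','l','o','a','t','3','2'])] ['s']
    (fun kv hkv => clash_notPrefix (by fin_cases hkv <;> decide)) _]
  exact ⟨_, rfl⟩

-- B copies the 'S': no alternative matches at the front of 'StrucTuple' ++ x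
theorem tightB (x : List Char) : ∃ W, pvScan (pvST ++ x) = 'S' :: W := by
  have hnone : pvFindTok (pvST ++ x) = none := by
    rw [pvFindTok, List.find?_eq_none]
    intro kv hkv
    fin_cases hkv <;> simp [List.isPrefixOf, pvST]
  exact ⟨_, pvScan_cons_none hnone⟩

theorem pvTight : ∀ n cs, cs.length ≤ n → pvST <:+: cs →
    pvApply pvTable cs ≠ pvScan cs := by
  intro n
  induction n with
  | zero =>
    intro cs hlen hinf
    have : cs = [] := by cases cs with | nil => rfl | cons a b => simp at hlen
    subst this
    simp [pvST] at hinf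
  | succ n ih =>
    intro cs hlen hinf
    by_cases hp : pvST <+: cs
    · obtain ⟨x, rfl⟩ := hp
      obtain ⟨W1, hA⟩ := tightA x
      obtain ⟨W2, hB⟩ := tightB x
      rw [hA, hB]
      simp
    · cases cs with
      | nil => simp [pvST] at hinf
      | cons c t =>
        cases hF : pvFindTok (c :: t) with
        | some kv =>
          have hmem := List.mem_of_find?_eq_some hF
          have hkpre : kv.1.isPrefixOf (c :: t) = true := by
            have := List.find?_some hF; simpa using this
          rw [List.isPrefixOf_iff_prefix] at hkpre
          obtain ⟨r, hr⟩ := hkpre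
          obtain ⟨kk, vv⟩ := kv
          simp only [pvTable, List.mem_cons, List.not_mem_nil, or_false] at hmem
          simp only [] at hr
          rcases hmem with hkv|hkv|hkv|hkv|hkv|hkv|hkv|hkv|hkv|hkv|hkv
          · -- token 'String'
            obtain ⟨rfl, rfl⟩ := Prod.mk.injEq .. |>.mp hkv
            rw [← hr] at hF hp hinf ⊢
            have hlr : r.length ≤ n := by
              have := congrArg List.length hr; simp at this hlen; omega
            have hinfr : pvST <:+: r := infix_append_elim _ r (by decide) hinf hp
            rw [tokStepA ([] : List (List Char × List Char)) [(['A','r','r','a','y'], ['a','r','r','a','y']), (['S','e','t'], ['s','e','t']), (['T','u','p','l','e'], ['t','u','p','l','e']), (['S','t','r','u','c','t'], ['s','t','r','u','c','t']), (['['], ['<']), ([']'], ['>']), (['I','n','t','3','2'], ['i','n','t','3','2']), (['I','n','t','6','4'], ['i','n','t','6','4']), (['F','l','o','a','t','6','4'], ['f','l','o','a','t','6','4']), (['F','l','o','a','t','3','2'], ['f','l','o','a','t','3','2'])] ['S','t','r','i','n','g'] ['s','t','r'] r (by decide) (by decide)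
                (by decide) (by decide),
              scanStep _ _ _ hF (by decide)]
            intro heq
            exact ih r hlr hinfr (List.append_cancel_left heq)
          · -- token 'Array'
            obtain ⟨rfl, rfl⟩ := Prod.mk.injEq .. |>.mp hkv
            rw [← hr] at hF hp hinf ⊢
            have hlr : r.length ≤ n := by
              have := congrArg List.length hr; simp at this hlen; omega
            have hinfr : pvST <:+: r := infix_append_elim _ r (by decide) hinf hp
            rw [tokStepA [(['S','t','r','i','n','g'], ['s','t','r'])] [(['S','e','t'], ['s','e','t']), (['T','u','p','l','e'], ['t','u','p','l','e']), (['S','t','r','u','c','t'], ['s','t','r','u','c','t']), (['['], ['<']), ([']'], ['>']), (['I','n','t','3','2'], ['i','n','t','3','2']), (['I','n','t','6','4'], ['i','n','t','6','4']), (['F','l','o','a','t','6','4'], ['f','l','o','a','t','6','4']), (['F','l','o','a','t','3','2'], ['f','l','o','a','t','3','2'])] ['A','r','r','a','y'] ['a','r','r','a','y'] r (by decide) (by decide)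
                (by decide) (by decide),
              scanStep _ _ _ hF (by decide)]
            intro heq
            exact ih r hlr hinfr (List.append_cancel_left heq)
          · -- token 'Set'
            obtain ⟨rfl, rfl⟩ := Prod.mk.injEq .. |>.mp hkv
            rw [← hr] at hF hp hinf ⊢
            have hlr : r.length ≤ n := by
              have := congrArg List.length hr; simp at this hlen; omega
            have hinfr : pvST <:+: r := infix_append_elim _ r (by decide) hinf hp
            rw [tokStepA [(['S','t','r','i','n','g'], ['s','t','r']), (['A','r','r','a','y'], ['a','r','r','a','y'])] [(['T','u','p','l','e'], ['t','u','p','l','e']), (['S','t','r','u','c','t'], ['s','t','r','u','c','t']), (['['], ['<']), ([']'], ['>']), (['I','n','t','3','2'], ['i','n','t','3','2']), (['I','n','t','6','4'], ['i','n','t','6','4']), (['F','l','o','a','t','6','4'], ['f','l','o','a','t','6','4']), (['F','l','o','a','t','3','2'], ['f','l','o','a','t','3','2'])] ['S','e','t'] ['s','e','t'] r (by decide) (by decide)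
                (by decide) (by decide),
              scanStep _ _ _ hF (by decide)]
            intro heq
            exact ih r hlr hinfr (List.append_cancel_left heq)
          · -- token 'Tuple'
            obtain ⟨rfl, rfl⟩ := Prod.mk.injEq .. |>.mp hkv
            rw [← hr] at hF hp hinf ⊢
            have hlr : r.length ≤ n := by
              have := congrArg List.length hr; simp at this hlen; omega
            have hinfr : pvST <:+: r := infix_append_elim _ r (by decide) hinf hp
            rw [tokStepA [(['S','t','r','i','n','g'], ['s','t','r']), (['A','r','r','a','y'], ['a','r','r','a','y']), (['S','e','t'], ['s','e','t'])] [(['S','t','r','u','c','t'], ['s','t','r','u','c','t']), (['['], ['<']), ([']'], ['>']), (['I','n','t','3','2'], ['i','n','t','3','2']), (['I','n','t','6','4'], ['i','n','t','6','4']), (['F','l','o','a','t','6','4'], ['f','l','o','a','t','6','4']), (['F','l','o','a','t','3','2'], ['f','l','o','a','t','3','2'])] ['T','u','p','l','e'] ['t','u','p','l','e'] r (by decide) (by decide)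
                (by decide) (by decide),
              scanStep _ _ _ hF (by decide)]
            intro heq
            exact ih r hlr hinfr (List.append_cancel_left heq)
          · -- token 'Struct'
            obtain ⟨rfl, rfl⟩ := Prod.mk.injEq .. |>.mp hkv
            rw [← hr] at hF hp hinf ⊢
            have hlr : r.length ≤ n := by
              have := congrArg List.length hr; simp at this hlen; omega
            have hinfr : pvST <:+: r := infix_append_elim _ r (by decide) hinf hp
            rw [tokStepA [(['S','t','r','i','n','g'], ['s','t','r']), (['A','r','r','a','y'], ['a','r','r','a','y']), (['S','e','t'], ['s','e','t']), (['T','u','p','l','e'], ['t','u','p','l','e'])] [(['['], ['<']), ([']'], ['>']), (['I','n','t','3','2'], ['i','n','t','3','2']), (['I','n','t','6','4'], ['i','n','t','6','4']), (['F','l','o','a','t','6','4'], ['f','l','o','a','t','6','4']), (['F','l','o','a','t','3','2'], ['f','l','o','a','t','3','2'])] ['S','t','r','u','c','t'] ['s','t','r','u','c','t'] r (by decide) (by decide)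
                (by decide) (by decide),
              scanStep _ _ _ hF (by decide)]
            intro heq
            exact ih r hlr hinfr (List.append_cancel_left heq)
          · -- token '['
            obtain ⟨rfl, rfl⟩ := Prod.mk.injEq .. |>.mp hkv
            rw [← hr] at hF hp hinf ⊢
            have hlr : r.length ≤ n := by
              have := congrArg List.length hr; simp at this hlen; omega
            have hinfr : pvST <:+: r := infix_append_elim _ r (by decide) hinf hp
            rw [tokStepA [(['S','t','r','i','n','g'], ['s','t','r']), (['A','r','r','a','y'], ['a','r','r','a','y']), (['S','e','t'], ['s','e','t']), (['T','u','p','l','e'], ['t','u','p','l','e']), (['S','t','r','u','c','t'], ['s','t','r','u','c','t'])] [([']'], ['>']), (['I','n','t','3','2'], ['i','n','t','3','2']), (['I','n','t','6','4'], ['i','n','t','6','4']), (['F','l','o','a','t','6','4'], ['f','l','o','a','t','6','4']), (['F','l','o','a','t','3','2'], ['f','l','o','a','t','3','2'])] ['['] ['<'] r (by decide) (by decide)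
                (by decide) (by decide),
              scanStep _ _ _ hF (by decide)]
            intro heq
            exact ih r hlr hinfr (List.append_cancel_left heq)
          · -- token ']'
            obtain ⟨rfl, rfl⟩ := Prod.mk.injEq .. |>.mp hkv
            rw [← hr] at hF hp hinf ⊢
            have hlr : r.length ≤ n := by
              have := congrArg List.length hr; simp at this hlen; omega
            have hinfr : pvST <:+: r := infix_append_elim _ r (by decide) hinf hp
            rw [tokStepA [(['S','t','r','i','n','g'], ['s','t','r']), (['A','r','r','a','y'], ['a','r','r','a','y']), (['S','e','t'], ['s','e','t']), (['T','u','p','l','e'], ['t','u','p','l','e']), (['S','t','r','u','c','t'], ['s','t','r','u','c','t']), (['['], ['<'])] [(['I','n','t','3','2'], ['i','n','t','3','2']), (['I','n','t','6','4'], ['i','n','t','6','4']), (['F','l','o','a','t','6','4'], ['f','l','o','a','t','6','4']), (['F','l','o','a','t','3','2'], ['f','l','o','a','t','3','2'])] [']'] ['>'] r (by decide) (by decide)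
                (by decide) (by decide),
              scanStep _ _ _ hF (by decide)]
            intro heq
            exact ih r hlr hinfr (List.append_cancel_left heq)
          · -- token 'Int32'
            obtain ⟨rfl, rfl⟩ := Prod.mk.injEq .. |>.mp hkv
            rw [← hr] at hF hp hinf ⊢
            have hlr : r.length ≤ n := by
              have := congrArg List.length hr; simp at this hlen; omega
            have hinfr : pvST <:+: r := infix_append_elim _ r (by decide) hinf hp
            rw [tokStepA [(['S','t','r','i','n','g'], ['s','t','r']), (['A','r','r','a','y'], ['a','r','r','a','y']), (['S','e','t'], ['s','e','t']), (['T','u','p','l','e'], ['t','u','p','l','e']), (['S','t','r','u','c','t'], ['s','t','r','u','c','t']), (['['], ['<']), ([']'], ['>'])] [(['I','n','t','6','4'], ['i','n','t','6','4']), (['F','l','o','a','t','6','4'], ['f','l','o','a','t','6','4']), (['F','l','o','a','t','3','2'], ['f','l','o','a','t','3','2'])] ['I','n','t','3','2'] ['i','n','t','3','2'] r (by decide) (by decide)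
                (by decide) (by decide),
              scanStep _ _ _ hF (by decide)]
            intro heq
            exact ih r hlr hinfr (List.append_cancel_left heq)
          · -- token 'Int64'
            obtain ⟨rfl, rfl⟩ := Prod.mk.injEq .. |>.mp hkv
            rw [← hr] at hF hp hinf ⊢
            have hlr : r.length ≤ n := by
              have := congrArg List.length hr; simp at this hlen; omega
            have hinfr : pvST <:+: r := infix_append_elim _ r (by decide) hinf hp
            rw [tokStepA [(['S','t','r','i','n','g'], ['s','t','r']), (['A','r','r','a','y'], ['a','r','r','a','y']), (['S','e','t'], ['s','e','t']), (['T','u','p','l','e'], ['t','u','p','l','e']), (['S','t','r','u','c','t'], ['s','t','r','u','c','t']), (['['], ['<']), ([']'], ['>']), (['I','n','t','3','2'], ['i','n','t','3','2'])] [(['F','l','o','a','t','6','4'], ['f','l','o','a','t','6','4']), (['F','l','o','a','t','3','2'], ['f','l','o','a','t','3','2'])] ['I','n','t','6','4'] ['i','n','t','6','4'] r (by decide) (by decide)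
                (by decide) (by decide),
              scanStep _ _ _ hF (by decide)]
            intro heq
            exact ih r hlr hinfr (List.append_cancel_left heq)
          · -- token 'Float64'
            obtain ⟨rfl, rfl⟩ := Prod.mk.injEq .. |>.mp hkv
            rw [← hr] at hF hp hinf ⊢
            have hlr : r.length ≤ n := by
              have := congrArg List.length hr; simp at this hlen; omega
            have hinfr : pvST <:+: r := infix_append_elim _ r (by decide) hinf hp
            rw [tokStepA [(['S','t','r','i','n','g'], ['s','t','r']), (['A','r','r','a','y'], ['a','r','r','a','y']), (['S','e','t'], ['s','e','t']), (['T','u','p','l','e'], ['t','u','p','l','e']), (['S','t','r','u','c','t'], ['s','t','r','u','c','t']), (['['], ['<']), ([']'], ['>']), (['I','n','t','3','2'], ['i','n','t','3','2']), (['I','n','t','6','4'], ['i','n','t','6','4'])] [(['F','l','o','a','t','3','2'], ['f','l','o','a','t','3','2'])] ['F','l','o','a','t','6','4'] ['f','l','o','a','t','6','4'] r (by decide) (by decide)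
                (by decide) (by decide),
              scanStep _ _ _ hF (by decide)]
            intro heq
            exact ih r hlr hinfr (List.append_cancel_left heq)
          · -- token 'Float32'
            obtain ⟨rfl, rfl⟩ := Prod.mk.injEq .. |>.mp hkv
            rw [← hr] at hF hp hinf ⊢
            have hlr : r.length ≤ n := by
              have := congrArg List.length hr; simp at this hlen; omega
            have hinfr : pvST <:+: r := infix_append_elim _ r (by decide) hinf hp
            rw [tokStepA [(['S','t','r','i','n','g'], ['s','t','r']), (['A','r','r','a','y'], ['a','r','r','a','y']), (['S','e','t'], ['s','e','t']), (['T','u','p','l','e'], ['t','u','p','l','e']), (['S','t','r','u','c','t'], ['s','t','r','u','c','t']), (['['], ['<']), ([']'], ['>']), (['I','n','t','3','2'], ['i','n','t','3','2']), (['I','n','t','6','4'], ['i','n','t','6','4']), (['F','l','o','a','t','6','4'], ['f','l','o','a','t','6','4'])] ([] : List (List Char × List Char)) ['F','l','o','a','t','3','2'] ['f','l','o','a','t','3','2'] r (by decide) (by decide)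
                (by decide) (by decide),
              scanStep _ _ _ hF (by decide)]
            intro heq
            exact ih r hlr hinfr (List.append_cancel_left heq)
        | none =>
          have hnone : ∀ kv ∈ pvTable, ¬ (kv.1.isPrefixOf (c :: t)) = true := by
            rw [pvFindTok, List.find?_eq_none] at hF
            exact hF
          rw [headStep c pvTable t (headCond c t hnone hp), pvScan_cons_none hF]
          have hinft : pvST <:+: t := by
            rcases List.infix_cons_iff.mp hinf with h | h
            · exact absurd h hp
            · exact h
          intro heq
          exact ih t (by simp at hlen; omega) hinft (by simpa using heq)

-- ---- bridging the String-level ports to the list level ----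
theorem foldl_str_bridge : ∀ (l : List (String × String)) (s : String),
    (l.foldl (fun s kv => PySem.Str.replace s kv.1 kv.2) s) =
      String.ofList (pvApply (l.map (fun kv => (kv.1.toList, kv.2.toList))) s.toList) := by
  intro l
  induction l with
  | nil => intro s; simp [pvApply, String.ofList_toList]
  | cons kv l' ih =>
    intro s
    show (l'.foldl _ (PySem.Str.replace s kv.1 kv.2)) = _
    rw [ih]
    congr 1
    show pvApply _ (PySem.Str.replace s kv.1 kv.2).toList =
      pvApply _ (PySem.Chars.replace s.toList kv.1.toList kv.2.toList)
    rw [PySem.Str.toList_replace]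

theorem A_eq (s : String) : transform_schema s = String.ofList (pvApply pvTable s.toList) := by
  show pvPairs.foldl _ s = _
  rw [foldl_str_bridge]
  rw [show pvPairs.map (fun kv => (kv.1.toList, kv.2.toList)) = pvTable from by decide]

-- ===== VERDICT (by name: the statement is the Claim_ definition above) =====
set_option maxHeartbeats 1000000 in
theorem transform_schema_spec : Claim_unchanged_transform_schema := by
  intro s hdom
  unfold Spec_transform_schema
  intro hnd
  have hst : ¬ (pvST <:+: s.toList) := by
    intro hx
    apply hnd
    show PySem.Str.isIn "StrucTuple" s = true
    rw [PySem.Str.isIn_iff_infix, show "StrucTuple".toList = pvST from by decide]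
    exact hx
  rw [A_eq]
  exact congrArg String.ofList (pvMain s.toList.length s.toList (le_refl _) hst)

set_option maxRecDepth 16384 in
set_option maxHeartbeats 1000000 in
theorem transform_schema_changed : Claim_changed_transform_schema := by
  unfold Claim_changed_transform_schema; decide

theorem transform_schema_tight : Claim_exact_transform_schema := by
  intro s hdom hd
  have hinf : pvST <:+: s.toList := by
    rw [show pvST = "StrucTuple".toList from by decide]
    exact (PySem.Str.isIn_iff_infix _ _).mp hd
  intro heq
  apply pvTight s.toList.length s.toList (le_refl _) hinf
  have h2 := congrArg String.toList heq
  rw [A_eq] at h2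
  simpa [transform_schema_alt, String.toList_ofList] using h2
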